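-- pv_equiv track=rewrite | github.com/pietromagaldi/MC102 | lab06.py | subtrai_vetores
-- ===== SOURCE A (Python) =====
-- def subtrai_vetores(v1: list[int], v2: list[int]) -> list[int]:
--     """
--     Subtrai elemento a elemento de dois vetores
--     :param v1: vetor 1
--     :param v2: vetor 2
--     :return: vetor resultante
--     """
--     v3 = []
--     for i in range(max(len(v1), len(v2))):
--         try:
--             v3.append(v1[i] - v2[i])
--         except IndexError:
--             try:
--                 v3.append(v1[i])
--             except IndexError:
--                 v3.append(v2[i] * -1)
--     return v3
-- ===== SOURCE B (Python) =====
-- def subtrai_vetores(v1: list[int], v2: list[int]) -> list[int]: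
--     """
--     Subtrai elemento a elemento de dois vetores
--     :param v1: vetor 1
--     :param v2: vetor 2
--     :return: vetor resultante
--     """
--     n = min(len(v1), len(v2))
--     head = [a - b for a, b in zip(v1, v2)]
--     tail1 = v1[n:]                      # leftover of v1 (nonempty only if v1 is longer)
--     tail2 = [-b for b in v2[n:]]        # negated leftover of v2 (only if v2 is longer)
--     return head + tail1 + tail2
-- ===== Notes on version B (the rewrite author's own statement) =====
-- stated objective: alternative
-- what changed: Instead of A's single index loop over max(len) with nested try/except IndexError per element, B decomposes the result structurally in staged passes: zip the common prefix and subtract, then append the untouched leftover of v1 or the negated leftover of v2 (at most one is nonempty), with no indexing or exception control flow at all.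
import Mathlib
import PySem

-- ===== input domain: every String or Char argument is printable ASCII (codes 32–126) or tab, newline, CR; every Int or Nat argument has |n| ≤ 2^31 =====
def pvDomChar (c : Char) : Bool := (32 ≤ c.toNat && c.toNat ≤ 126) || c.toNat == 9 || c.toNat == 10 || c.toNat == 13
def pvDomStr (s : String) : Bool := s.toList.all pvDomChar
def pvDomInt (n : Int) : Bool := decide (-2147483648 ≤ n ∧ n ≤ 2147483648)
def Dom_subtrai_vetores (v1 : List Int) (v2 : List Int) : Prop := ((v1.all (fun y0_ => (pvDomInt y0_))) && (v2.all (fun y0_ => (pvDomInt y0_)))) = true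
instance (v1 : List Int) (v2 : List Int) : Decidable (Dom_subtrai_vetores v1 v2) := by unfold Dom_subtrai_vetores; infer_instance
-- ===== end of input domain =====

-- B replaces A's index loop with nested try/except IndexError by a staged structural
-- decomposition: subtract over the zipped common prefix, then append the leftover tail
-- of v1 unchanged and the negated leftover tail of v2 (alternative; same cost).


-- ===== PORT A =====
-- for i in range(max(len(v1), len(v2))): try v1[i]-v2[i]; except: try v1[i]; except: v2[i]*-1
-- (pyGet? = none is the IndexError case; the none/none branch is Python's uncaught
--  IndexError, unreachable since i < max of the lengths)
def subtrai_vetores (v1 : List Int) (v2 : List Int) : List Int :=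
  (PySem.List.pyRange 0 (max (v1.length : Int) (v2.length : Int)) 1).foldl
    (fun v3 i =>
      match PySem.List.pyGet? v1 i with
      | some a =>
        match PySem.List.pyGet? v2 i with
        | some b => v3 ++ [a - b]
        | none => v3 ++ [a]
      | none =>
        match PySem.List.pyGet? v2 i with
        | some b => v3 ++ [b * -1]
        | none => v3) []

-- ===== PORT B =====
-- n = min(len v1, len v2); zip(v1,v2) stops at n; the slice xs[n:] with 0 ≤ n is
-- exactly List.drop n (exact here since n is a nonnegative in-range index).
def subtrai_vetores_alt (v1 : List Int) (v2 : List Int) : List Int :=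
  let n := min v1.length v2.length
  let head := List.zipWith (fun a b => a - b) v1 v2
  let tail1 := v1.drop n
  let tail2 := (v2.drop n).map (fun b => -b)
  head ++ tail1 ++ tail2

-- ===== PRECONDITION & SPEC =====
def Spec_subtrai_vetores (v1 : List Int) (v2 : List Int) (out : List Int) : Prop := out = subtrai_vetores_alt v1 v2
instance (v1 : List Int) (v2 : List Int) (out : List Int) : Decidable (Spec_subtrai_vetores v1 v2 out) := by unfold Spec_subtrai_vetores; infer_instance

-- ===== CLAIM (what is proved, stated in full; the proofs are below) =====
def Claim_equal_subtrai_vetores : Prop := ∀ (v1 : List Int) (v2 : List Int), Dom_subtrai_vetores v1 v2 → Spec_subtrai_vetores v1 v2 (subtrai_vetores v1 v2)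

-- ===== LEMMAS AND PROOFS =====

-- proof-only helper: the zero-padded elementwise formulation, a bridge between
-- A's index loop and B's staged decomposition
def pvPad (xs : List Int) (n : Nat) : List Int := xs ++ List.replicate (n - xs.length) 0

def pvPadSub (v1 v2 : List Int) : List Int :=
  let n := max v1.length v2.length
  List.zipWith (fun a b => a - b) (pvPad v1 n) (pvPad v2 n)

theorem pvPad_length {xs : List Int} {n : Nat} (h : xs.length ≤ n) :
    (pvPad xs n).length = n := by
  simp [pvPad]; omega

theorem pvPad_getElem (xs : List Int) (n k : Nat) (hk : k < n) (hlen : xs.length ≤ n) :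
    (pvPad xs n)[k]'(by rw [pvPad_length hlen]; exact hk)
      = if h : k < xs.length then xs[k] else 0 := by
  by_cases h : k < xs.length
  · simp [pvPad, List.getElem_append_left h, h]
  · simp only [pvPad]
    rw [List.getElem_append_right (by omega)]
    simp [h]

theorem pvPadSub_getElem (v1 v2 : List Int) (k : Nat)
    (hk : k < max v1.length v2.length) :
    (pvPadSub v1 v2)[k]'(by
        simp [pvPadSub, pvPad_length (Nat.le_max_left ..),
          pvPad_length (Nat.le_max_right ..)]; omega)
      = (if h : k < v1.length then v1[k] else 0)
        - (if h : k < v2.length then v2[k] else 0) := by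
  simp only [pvPadSub, List.getElem_zipWith]
  rw [pvPad_getElem v1 _ k hk (Nat.le_max_left ..),
      pvPad_getElem v2 _ k hk (Nat.le_max_right ..)]

theorem pvPadSub_length (v1 v2 : List Int) :
    (pvPadSub v1 v2).length = max v1.length v2.length := by
  simp [pvPadSub, pvPad_length (Nat.le_max_left ..),
    pvPad_length (Nat.le_max_right ..)]

-- loop invariant: after k iterations A's accumulator is the first k entries of pvPadSub
theorem pvLoop_take (v1 v2 : List Int) (k : Nat) (hk : k ≤ max v1.length v2.length) :
    (PySem.List.pyRange 0 (k : Int) 1).foldl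
      (fun v3 i =>
        match PySem.List.pyGet? v1 i with
        | some a =>
          match PySem.List.pyGet? v2 i with
          | some b => v3 ++ [a - b]
          | none => v3 ++ [a]
        | none =>
          match PySem.List.pyGet? v2 i with
          | some b => v3 ++ [b * -1]
          | none => v3) []
      = (pvPadSub v1 v2).take k := by
  induction k with
  | zero => simp
  | succ m ih =>
    have hm : m ≤ max v1.length v2.length := Nat.le_of_succ_le hk
    have hmlt : m < max v1.length v2.length := hk
    have hstep : PySem.List.pyRange 0 ((m + 1 : Nat) : Int) 1
        = PySem.List.pyRange 0 (m : Int) 1 ++ [(m : Int)] := by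
      push_cast
      exact PySem.List.pyRange_one_succ_right (by positivity)
    rw [hstep, List.foldl_append, ih hm]
    have htake : (pvPadSub v1 v2).take (m + 1)
        = (pvPadSub v1 v2).take m
          ++ [(pvPadSub v1 v2)[m]'(by rw [pvPadSub_length]; exact hmlt)] := by
      exact (List.take_succ_eq_append_getElem (by rw [pvPadSub_length]; exact hmlt))
    rw [htake, pvPadSub_getElem v1 v2 m hmlt]
    simp only [List.foldl_cons, List.foldl_nil, PySem.List.pyGet?_natCast]
    by_cases h1 : m < v1.length <;> by_cases h2 : m < v2.length <;>
      simp [h1, h2] ; omega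

theorem pvSub_replicate_right (v : List Int) :
    List.zipWith (fun a b => a - b) v (List.replicate v.length 0) = v := by
  induction v with
  | nil => rfl
  | cons a t ih => simp [List.replicate_succ, ih]

theorem pvSub_replicate_left (v : List Int) :
    List.zipWith (fun a b => a - b) (List.replicate v.length 0) v
      = v.map (fun b => -b) := by
  induction v with
  | nil => rfl
  | cons a t ih => simp [List.replicate_succ, ih]

-- the bridge: the padded formulation equals B's staged decomposition
theorem pvPadSub_eq_alt (v1 v2 : List Int) : pvPadSub v1 v2 = subtrai_vetores_alt v1 v2 := by
  induction v1 generalizing v2 with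
  | nil =>
    simp [pvPadSub, subtrai_vetores_alt, pvPad, pvSub_replicate_left]
  | cons a t1 ih =>
    cases v2 with
    | nil =>
      simp only [pvPadSub, subtrai_vetores_alt, pvPad]
      simpa using pvSub_replicate_right (a :: t1)
    | cons b t2 =>
      have h := ih t2
      simp only [pvPadSub, subtrai_vetores_alt, pvPad] at h ⊢
      simp only [List.length_cons, Nat.succ_sub_succ, Nat.succ_max_succ,
        List.cons_append, List.zipWith_cons_cons, Nat.succ_min_succ,
        List.drop_succ_cons]
      rw [h]

-- ===== VERDICT (by name: the statement is the Claim_ definition above) =====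
theorem subtrai_vetores_spec : Claim_equal_subtrai_vetores := by
  intro v1 v2 _
  show subtrai_vetores v1 v2 = subtrai_vetores_alt v1 v2
  have h := pvLoop_take v1 v2 (max v1.length v2.length) (le_refl _)
  rw [List.take_of_length_le (by rw [pvPadSub_length])] at h
  rw [← pvPadSub_eq_alt]
  simpa [subtrai_vetores] using h
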